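-- pv_equiv track=rewrite | github.com/miguel-zammit-uom/thesis_resources | Chapter_4__SpectralClassifier/PreProcessingPipeline/final_output_storage.py | _spectral_order_final_binning
-- ===== SOURCE A (Python) =====
-- from math import ceil
--
-- def _spectral_order_final_binning(wl, flux, num_cnn_bins):
--     """Bins data into desired number of CNN bins"""
--
--     num_datapoints = len(wl)
--     bin_size = ceil(num_datapoints / num_cnn_bins)
--     final_wl, final_flux = [], []
--
--     for bin_i in range(num_cnn_bins):
--         bin_wl, bin_flux = [], []
--         for bin_entry in range(bin_size):
--             index = (bin_i * bin_size) + bin_entry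
--             if index < num_datapoints:
--                 bin_wl.append(wl[index]), bin_flux.append(flux[index])
--             else:
--                 break
--         final_wl.append(bin_wl), final_flux.append(bin_flux)
--
--     return final_wl, final_flux
-- ===== SOURCE B (Python) =====
-- from math import ceil
--
--
-- def _spectral_order_final_binning(wl, flux, num_cnn_bins):
--     """Bins data into desired number of CNN bins (slice-based)."""
--     pairs = list(zip(wl, flux))
--     bin_size = ceil(len(wl) / num_cnn_bins)
--     bins = [pairs[b * bin_size:(b + 1) * bin_size] for b in range(num_cnn_bins)]
--     return [[w for w, _ in bin_] for bin_ in bins], [[f for _, f in bin_] for bin_ in bins]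
-- ===== Notes on version B (the rewrite author's own statement) =====
-- stated objective: alternative
-- what changed: A gathers each bin with nested index loops and a break; B zips wl and flux once and builds each bin by list slicing pairs[b*bin_size:(b+1)*bin_size], then unzips.
import Mathlib
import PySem

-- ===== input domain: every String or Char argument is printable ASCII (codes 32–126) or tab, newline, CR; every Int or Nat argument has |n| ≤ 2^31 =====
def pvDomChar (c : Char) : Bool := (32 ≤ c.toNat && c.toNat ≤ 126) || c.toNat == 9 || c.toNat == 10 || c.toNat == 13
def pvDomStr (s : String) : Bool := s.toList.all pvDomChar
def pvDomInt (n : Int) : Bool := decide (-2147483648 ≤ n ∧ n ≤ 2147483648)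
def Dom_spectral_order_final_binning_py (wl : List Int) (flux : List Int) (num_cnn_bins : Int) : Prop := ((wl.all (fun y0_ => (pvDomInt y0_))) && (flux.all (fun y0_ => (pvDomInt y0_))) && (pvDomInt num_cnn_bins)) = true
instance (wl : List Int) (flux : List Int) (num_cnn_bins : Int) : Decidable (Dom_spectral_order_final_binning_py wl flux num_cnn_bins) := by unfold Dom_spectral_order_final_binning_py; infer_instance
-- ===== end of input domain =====

-- B replaces A's nested gather loops (with break) by zipping the two arrays once and slicing the
-- zipped list per bin — a different decomposition, same cost (objective: alternative).


-- ===== PORT A =====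
-- inner 'for bin_entry in range(bin_size)' loop with its break; base = bin_i * bin_size,
-- index = base + bin_entry.  wl[index]/flux[index] via pyGetD: under Pre_ every accessed
-- index is in range (0 ≤ index < len), so the default 0 is never used.
def pvInnerA (wl flux : List Int) (n base : Int) : List Int → List Int → List Int → List Int × List Int
  | [], accW, accF => (accW, accF)
  | e :: rest, accW, accF =>
    let index := base + e
    if index < n then
      pvInnerA wl flux n base rest (accW ++ [PySem.List.pyGetD wl index 0]) (accF ++ [PySem.List.pyGetD flux index 0])
    else (accW, accF)

-- math.ceil(num_datapoints / num_cnn_bins): exact as ceiling division -((-n) // num) on this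
-- domain (float quotient of ints of this size never rounds across an integer boundary).
def spectral_order_final_binning_py (wl : List Int) (flux : List Int) (num_cnn_bins : Int) : List (List Int) × List (List Int) :=
  let num_datapoints : Int := wl.length
  let bin_size : Int := -(PySem.Int.floordiv (-num_datapoints) num_cnn_bins)
  (PySem.List.pyRange 0 num_cnn_bins 1).foldl
    (fun (acc : List (List Int) × List (List Int)) bin_i =>
      let bin := pvInnerA wl flux num_datapoints (bin_i * bin_size) (PySem.List.pyRange 0 bin_size 1) [] []
      (acc.1 ++ [bin.1], acc.2 ++ [bin.2]))
    ([], [])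

-- ===== PORT B =====
def spectral_order_final_binning_py_alt (wl : List Int) (flux : List Int) (num_cnn_bins : Int) : List (List Int) × List (List Int) :=
  let pairs := wl.zip flux
  let bin_size : Int := -(PySem.Int.floordiv (-(wl.length : Int)) num_cnn_bins)
  let bins := (PySem.List.pyRange 0 num_cnn_bins 1).map
    (fun b => PySem.List.slice pairs (some (b * bin_size)) (some ((b + 1) * bin_size)))
  (bins.map (fun bin => bin.map Prod.fst), bins.map (fun bin => bin.map Prod.snd))

-- ===== PRECONDITION & SPEC =====
-- Pre_ excludes exactly the inputs where A raises: num_cnn_bins = 0 (ZeroDivisionError) and,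
-- for positive num_cnn_bins, flux shorter than wl (IndexError while reading flux[index];
-- with negative num_cnn_bins nothing is indexed and A returns).
def Pre_spectral_order_final_binning_py (wl : List Int) (flux : List Int) (num_cnn_bins : Int) : Prop :=
  num_cnn_bins ≠ 0 ∧ (num_cnn_bins < 0 ∨ wl.length ≤ flux.length)
instance (wl : List Int) (flux : List Int) (num_cnn_bins : Int) : Decidable (Pre_spectral_order_final_binning_py wl flux num_cnn_bins) := by unfold Pre_spectral_order_final_binning_py; infer_instance

def pvWitness_spectral_order_final_binning_py : List Int × List Int × Int := ([1, 2, 3, 4, 5], [10, 20, 30, 40, 50], 2)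

def Spec_spectral_order_final_binning_py (wl : List Int) (flux : List Int) (num_cnn_bins : Int) (out : List (List Int) × List (List Int)) : Prop := out = spectral_order_final_binning_py_alt wl flux num_cnn_bins
instance (wl : List Int) (flux : List Int) (num_cnn_bins : Int) (out : List (List Int) × List (List Int)) : Decidable (Spec_spectral_order_final_binning_py wl flux num_cnn_bins out) := by unfold Spec_spectral_order_final_binning_py; infer_instance

-- ===== CLAIM (what is proved, stated in full; the proofs are below) =====
def Claim_equal_spectral_order_final_binning_py : Prop := ∀ (wl : List Int) (flux : List Int) (num_cnn_bins : Int), Dom_spectral_order_final_binning_py wl flux num_cnn_bins → Pre_spectral_order_final_binning_py wl flux num_cnn_bins → Spec_spectral_order_final_binning_py wl flux num_cnn_bins (spectral_order_final_binning_py wl flux num_cnn_bins)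


-- ===== LEMMAS AND PROOFS =====

-- shifting the entry values by one is the same as shifting the base index
lemma pvInnerA_shift (wl flux : List Int) (n base : Int) (es accW accF : List Int) :
    pvInnerA wl flux n base (es.map (fun e => e + 1)) accW accF
      = pvInnerA wl flux n (base + 1) es accW accF := by
  induction es generalizing accW accF with
  | nil => rfl
  | cons e rest ih =>
    simp only [List.map_cons, pvInnerA]
    have h : base + (e + 1) = base + 1 + e := by ring
    rw [h]
    split_ifs with hlt
    · exact ih _ _
    · rfl

-- the inner loop collects the slice [base, base+k) of the zipped pairs
lemma pvInnerA_spec (wl flux : List Int) (hl : wl.length ≤ flux.length) :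
    ∀ (k : Nat) (base : Int), 0 ≤ base → ∀ (accW accF : List Int),
    pvInnerA wl flux (wl.length : Int) base (PySem.List.pyRange 0 (k : Int) 1) accW accF
      = (accW ++ (((wl.zip flux).drop base.toNat).take k).map Prod.fst,
         accF ++ (((wl.zip flux).drop base.toNat).take k).map Prod.snd) := by
  intro k
  induction k with
  | zero =>
    intro base hb accW accF
    rw [PySem.List.pyRange_one_eq_nil (by omega)]
    simp [pvInnerA]
  | succ k ih =>
    intro base hb accW accF
    have hcons : PySem.List.pyRange 0 ((k : Int) + 1) 1 = 0 :: PySem.List.pyRange 1 ((k : Int) + 1) 1 :=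
      PySem.List.pyRange_one_cons (by omega)
    have hshift : PySem.List.pyRange 1 ((k : Int) + 1) 1
        = (PySem.List.pyRange 0 (k : Int) 1).map (fun e => e + 1) := by
      rw [PySem.List.pyRange_one 1, PySem.List.pyRange_one 0]
      have : ((k : Int) + 1 - 1).toNat = ((k : Int) - 0).toNat := by omega
      rw [this, List.map_map]
      apply List.map_congr_left
      intro x _
      simp; ring
    have hzlen : (wl.zip flux).length = wl.length := by
      simp [List.length_zip]; omega
    push_cast
    rw [hcons]
    simp only [pvInnerA]
    rw [add_zero]
    by_cases hlt : base < (wl.length : Int)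
    · have hbn : base.toNat < (wl.zip flux).length := by omega
      rw [if_pos hlt, hshift, pvInnerA_shift, ih (base + 1) (by omega)]
      have hget : (wl.zip flux)[base.toNat] = (wl[base.toNat]'(by omega), flux[base.toNat]'(by omega)) := by
        simp [List.getElem_zip]
      have hdrop : (wl.zip flux).drop base.toNat
          = (wl.zip flux)[base.toNat] :: (wl.zip flux).drop (base.toNat + 1) :=
        List.drop_eq_getElem_cons hbn
      have hb1 : (base + 1).toNat = base.toNat + 1 := by omega
      rw [hb1, hdrop, List.take_succ_cons, hget]
      have hw := PySem.List.pyGetD_eq_getElem wl (0 : Int) hb (show base < (wl.length : Int) by omega)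
      have hf := PySem.List.pyGetD_eq_getElem flux (0 : Int) hb (show base < (flux.length : Int) by omega)
      rw [hw, hf]
      simp
    · rw [if_neg hlt]
      have : (wl.zip flux).drop base.toNat = [] := by
        apply List.drop_eq_nil_of_le; omega
      simp [this]

-- a fold that appends one element to each component is a pair of maps
lemma foldl_pair_append (es : List Int) (f g : Int → List Int)
    (accW accF : List (List Int)) :
    es.foldl (fun (acc : List (List Int) × List (List Int)) i => (acc.1 ++ [f i], acc.2 ++ [g i])) (accW, accF)
      = (accW ++ es.map f, accF ++ es.map g) := by
  induction es generalizing accW accF with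
  | nil => simp
  | cons e rest ih => simp [List.foldl_cons, ih]

-- each bin of A equals the corresponding slice-bin of B
lemma bin_eq (wl flux : List Int) (hl : wl.length ≤ flux.length)
    (bs : Int) (hbs : 0 ≤ bs) (b : Int) (hb : 0 ≤ b) :
    pvInnerA wl flux (wl.length : Int) (b * bs) (PySem.List.pyRange 0 bs 1) [] []
      = ((PySem.List.slice (wl.zip flux) (some (b * bs)) (some ((b + 1) * bs))).map Prod.fst,
         (PySem.List.slice (wl.zip flux) (some (b * bs)) (some ((b + 1) * bs))).map Prod.snd) := by
  have hbase : 0 ≤ b * bs := mul_nonneg hb hbs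
  have hk : ((bs.toNat : Int)) = bs := Int.toNat_of_nonneg hbs
  have hslice : PySem.List.slice (wl.zip flux) (some (b * bs)) (some ((b + 1) * bs))
      = ((wl.zip flux).drop (b * bs).toNat).take (((b + 1) * bs).toNat - (b * bs).toNat) :=
    PySem.List.slice_toNat _ hbase (by nlinarith)
  have hsub : ((b + 1) * bs).toNat - (b * bs).toNat = bs.toNat := by
    have h1 : (b + 1) * bs = b * bs + bs := by ring
    omega
  have hmain := pvInnerA_spec wl flux hl bs.toNat (b * bs) hbase [] []
  rw [hk] at hmain
  rw [hmain, hslice, hsub]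
  simp

-- ===== VERDICT (by name: the statement is the Claim_ definition above) =====
theorem spectral_order_final_binning_py_spec : Claim_equal_spectral_order_final_binning_py := by
  intro wl flux num_cnn_bins _ hpre
  obtain ⟨hnz, hor⟩ := hpre
  unfold Spec_spectral_order_final_binning_py
  unfold spectral_order_final_binning_py spectral_order_final_binning_py_alt
  by_cases hpos : 0 < num_cnn_bins
  · have hl : wl.length ≤ flux.length := by omega
    have hbsnn : 0 ≤ -(PySem.Int.floordiv (-((wl.length : Int))) num_cnn_bins) := by
      have h1 : PySem.Int.floordiv (-((wl.length : Int))) num_cnn_bins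
          = (-((wl.length : Int))) / num_cnn_bins := PySem.Int.floordiv_eq_ediv_of_pos hpos
      have h2 : (-((wl.length : Int))) / num_cnn_bins ≤ 0 / num_cnn_bins :=
        Int.ediv_le_ediv hpos (by omega)
      simp at h2
      omega
    simp only [foldl_pair_append, List.nil_append, List.map_map]
    refine Prod.ext ?_ ?_ <;>
    · apply List.map_congr_left
      intro b hbmem
      have hb : 0 ≤ b := ((PySem.List.mem_pyRange_one).1 hbmem).1
      have hbin := bin_eq wl flux hl _ hbsnn b hb
      simp only [hbin]
      rfl
  · rw [PySem.List.pyRange_one_eq_nil (by omega)]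
    simp
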